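-- pv_equiv track=rewrite | github.com/nalin-pixel/backend-repo_mhl670xs_8bgjey | main.py | filter_medically_relevant
-- ===== SOURCE A (Python) =====
-- from typing import Optional, List, Dict, Any
--
-- def filter_medically_relevant(text: str) -> str:
--     # Keep lines with common medical tokens
--     keywords = [
--         'tab', 'tablet', 'cap', 'capsule', 'syrup', 'ml', 'mg', 'mcg', 'bid', 'tid', 'qid', 'od',
--         'diagnosis', 'dx', 'rx', 'bp', 'hr', 'temp', 'fever', 'cough', 'pain', 'infection', 'asthma', 'diabetes'
--     ]
--     lines = [l.strip() for l in text.splitlines() if l.strip()]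
--     kept: List[str] = []
--     for l in lines:
--         lower = l.lower()
--         if any(k in lower for k in keywords):
--             kept.append(l)
--     # If nothing kept, fallback to first 10 lines after PII stripping
--     if not kept:
--         kept = lines[:10]
--     return "\n".join(kept)
-- ===== SOURCE B (Python) =====
-- def filter_medically_relevant(text: str) -> str:
--     # Relevance by substring indexing: build the set of ALL substrings of the
--     # keyword lengths once per line, then a single set intersection with the
--     # keyword set (no per-keyword substring search).
--     keywords = frozenset([
--         'tab', 'tablet', 'cap', 'capsule', 'syrup', 'ml', 'mg', 'mcg', 'bid', 'tid', 'qid', 'od',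
--         'diagnosis', 'dx', 'rx', 'bp', 'hr', 'temp', 'fever', 'cough', 'pain', 'infection', 'asthma', 'diabetes'
--     ])
--     lengths = sorted({len(k) for k in keywords})
--
--     def relevant(lower: str) -> bool:
--         subs = {lower[i:i + n] for n in lengths for i in range(len(lower) - n + 1)}
--         return not keywords.isdisjoint(subs)
--
--     lines = [l.strip() for l in text.splitlines() if l.strip()]
--     kept = [l for l in lines if relevant(l.lower())]
--     return "\n".join(kept if kept else lines[:10])
-- ===== Notes on version B (the rewrite author's own statement) =====
-- stated objective: alternative
-- what changed: Relevance per line is decided by building the set of all substrings of the keyword lengths and taking one set intersection with a frozenset of keywords (the per-keyword substring-search loop disappears), and the kept lines are produced by staged comprehensions instead of A's accumulator loop.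
import Mathlib
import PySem

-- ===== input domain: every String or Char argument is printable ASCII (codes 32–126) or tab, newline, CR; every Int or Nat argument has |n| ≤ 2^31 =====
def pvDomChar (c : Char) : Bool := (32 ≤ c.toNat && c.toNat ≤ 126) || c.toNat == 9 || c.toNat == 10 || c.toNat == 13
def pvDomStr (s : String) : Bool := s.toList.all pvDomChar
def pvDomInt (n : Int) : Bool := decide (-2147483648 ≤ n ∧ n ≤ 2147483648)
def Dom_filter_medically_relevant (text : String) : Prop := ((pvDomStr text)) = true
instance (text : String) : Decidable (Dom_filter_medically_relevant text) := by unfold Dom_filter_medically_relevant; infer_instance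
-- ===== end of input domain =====

-- B decides relevance by indexing: the set of all substrings of the keyword lengths is built
-- once per line and intersected with the keyword set, instead of one substring search per
-- keyword (objective: alternative algorithm/data structure; same exact output).

-- ===== PORT A =====
def pvKeywords : List String :=
  ["tab", "tablet", "cap", "capsule", "syrup", "ml", "mg", "mcg", "bid", "tid", "qid", "od",
   "diagnosis", "dx", "rx", "bp", "hr", "temp", "fever", "cough", "pain", "infection", "asthma", "diabetes"]

def filter_medically_relevant (text : String) : String :=
  let lines := ((PySem.Str.splitlines text).map PySem.Str.strip).filter (fun l => l != "")
  let kept := lines.foldl (fun kept l =>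
      let lower := PySem.Str.lower l
      if pvKeywords.any (fun k => PySem.Str.isIn k lower) then kept ++ [l] else kept) []
  let kept := if kept = [] then PySem.List.slice lines none (some 10) else kept
  PySem.Str.join "\n" kept

-- ===== PORT B =====
-- keywords = frozenset([...]); lengths = sorted({len(k) for k in keywords})
def pvKeywordSet : PySem.Set String := PySem.Set.ofList pvKeywords
def pvLengths : List Int :=
  PySem.List.sorted (PySem.Set.ofList (pvKeywords.map PySem.Str.len)) (fun n => n) false

-- subs = {lower[i:i+n] for n in lengths for i in range(len(lower)-n+1)}; not keywords.isdisjoint(subs)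
def pvRelevant (lower : String) : Bool :=
  let subs : PySem.Set String := PySem.Set.ofList
    (pvLengths.flatMap (fun n =>
      (PySem.List.pyRange 0 (PySem.Str.len lower - n + 1) 1).map
        (fun i => PySem.Str.slice lower (some i) (some (i + n)))))
  !(PySem.Set.isdisjoint pvKeywordSet subs)

def filter_medically_relevant_alt (text : String) : String :=
  let lines := ((PySem.Str.splitlines text).map PySem.Str.strip).filter (fun l => l != "")
  let kept := lines.filter (fun l => pvRelevant (PySem.Str.lower l))
  PySem.Str.join "\n" (if kept = [] then PySem.List.slice lines none (some 10) else kept)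

-- ===== PRECONDITION & SPEC =====
def Spec_filter_medically_relevant (text : String) (out : String) : Prop := out = filter_medically_relevant_alt text
instance (text : String) (out : String) : Decidable (Spec_filter_medically_relevant text out) := by unfold Spec_filter_medically_relevant; infer_instance

-- ===== CLAIM (what is proved, stated in full; the proofs are below) =====
def Claim_equal_filter_medically_relevant : Prop := ∀ (text : String), Dom_filter_medically_relevant text → Spec_filter_medically_relevant text (filter_medically_relevant text)

-- ===== LEMMAS AND PROOFS =====

-- A's per-line test, as a named predicate
def pvPredA (l : String) : Bool :=
  pvKeywords.any (fun k => PySem.Str.isIn k (PySem.Str.lower l))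

-- each keyword's length is listed in pvLengths, and it is positive
lemma pvKeywords_len_mem : ∀ k ∈ pvKeywords, PySem.Str.len k ∈ pvLengths ∧ 0 < k.toList.length := by
  decide

-- every length in pvLengths is nonnegative
lemma pvLengths_nonneg : ∀ n ∈ pvLengths, 0 ≤ n := by decide

-- B's substring-set intersection decides exactly A's substring test
lemma pvRelevant_eq (l : String) : pvRelevant (PySem.Str.lower l) = pvPredA l := by
  rw [Bool.eq_iff_iff]
  simp only [pvRelevant, pvPredA, Bool.not_eq_true', List.any_eq_true,
    ← Bool.not_eq_true, ← not_forall]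
  rw [iff_iff_implies_and_implies]
  constructor
  · intro hnd
    rw [PySem.Set.isdisjoint_iff] at hnd
    push_neg at hnd
    obtain ⟨k, hk, hmem⟩ := hnd
    rw [PySem.Set.mem_ofList, List.mem_flatMap] at hmem
    obtain ⟨n, hn, hi⟩ := hmem
    rw [List.mem_map] at hi
    obtain ⟨i, hir, hs⟩ := hi
    rw [PySem.List.mem_pyRange_one] at hir
    have hk' : k ∈ pvKeywords := (PySem.Set.mem_ofList _ _).mp hk
    refine ⟨k, hk', ?_⟩
    rw [PySem.Str.isIn_eq, ← PySem.Chars.exists_prefix_drop_iff_isIn]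
    have hn0 : 0 ≤ n := pvLengths_nonneg n hn
    have hs' : (PySem.Str.slice (PySem.Str.lower l) (some i) (some (i + n))).toList
        = k.toList := by rw [hs]
    rw [PySem.Str.toList_slice, PySem.Chars.slice_eq_listSlice,
        PySem.List.slice_toNat _ hir.1 (by omega)] at hs'
    exact ⟨i.toNat, by rw [← hs']; exact List.take_prefix _ _⟩
  · rintro ⟨k, hk, hin⟩
    rw [PySem.Set.isdisjoint_iff]
    push_neg
    refine ⟨k, (PySem.Set.mem_ofList _ _).mpr hk, ?_⟩
    rw [PySem.Str.isIn_eq, ← PySem.Chars.exists_prefix_drop_iff_isIn] at hin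
    obtain ⟨j, hj⟩ := hin
    obtain ⟨hnmem, hkpos⟩ := pvKeywords_len_mem k hk
    have hjn : j + k.toList.length ≤ (PySem.Str.lower l).toList.length := by
      have := hj.length_le
      simp only [List.length_drop] at this
      by_cases hjl : j ≤ (PySem.Str.lower l).toList.length
      · omega
      · rw [List.drop_eq_nil_of_le (by omega)] at hj
        have := List.prefix_nil.mp hj
        omega
    have hlen : PySem.Str.len k = (k.toList.length : Int) := by simp [PySem.Str.len_eq]
    rw [PySem.Set.mem_ofList, List.mem_flatMap]
    refine ⟨PySem.Str.len k, hnmem, ?_⟩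
    rw [List.mem_map]
    refine ⟨(j : Int), ?_, ?_⟩
    · rw [PySem.List.mem_pyRange_one]
      constructor
      · positivity
      · simp only [PySem.Str.len_eq]
        have : (PySem.Str.lower l).toList.length = PySem.Str.len (PySem.Str.lower l) := by
          simp [PySem.Str.len_eq]
        omega
    · apply String.toList_injective
      rw [PySem.Str.toList_slice, PySem.Chars.slice_eq_listSlice, hlen,
          PySem.List.slice_toNat _ (by positivity) (by positivity)]
      have htn : ((j : Int) + (k.toList.length : Int)).toNat - (j : Int).toNat = k.toList.length := by
        omega
      rw [htn, Int.toNat_natCast]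
      exact (List.prefix_iff_eq_take.mp hj).symm

-- A's kept-loop is the filter by pvPredA
lemma pvKeptA (lines : List String) :
    lines.foldl (fun kept l =>
        let lower := PySem.Str.lower l
        if pvKeywords.any (fun k => PySem.Str.isIn k lower) then kept ++ [l] else kept) []
      = lines.filter pvPredA := by
  have := PySem.List.foldl_append_if pvPredA (id : String → String) lines []
  simpa [pvPredA] using this

-- ===== VERDICT (by name: the statement is the Claim_ definition above) =====
theorem filter_medically_relevant_spec : Claim_equal_filter_medically_relevant := by
  intro text _
  unfold Spec_filter_medically_relevant
  simp only [filter_medically_relevant, filter_medically_relevant_alt, pvKeptA, pvRelevant_eq]
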